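-- pv_equiv track=rewrite | github.com/mwiebusch78/padawan | src/padawan/ordering.py | lex_cmp
-- ===== SOURCE A (Python) =====
-- def nullable_cmp(a, b):
--     if a is None:
--         if b is None:
--             return 0
--         return -1
--     if b is None:
--         return 1
--     if a == b:
--         return 0
--     elif a < b:
--         return -1
--     return 1
--
-- def lex_cmp(a, b):
--     if len(a) != len(b):
--         raise ValueError('Cannot compare tuples with different lengths.')
--     if len(a) == 0:
--         return 0
--     hcmp = nullable_cmp(a[0], b[0])
--     if len(a) == 1 or hcmp != 0:
--         return hcmp
--     return lex_cmp(a[1:], b[1:])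
-- ===== SOURCE B (Python) =====
-- def lex_cmp(a, b):
--     if len(a) != len(b):
--         raise ValueError('Cannot compare tuples with different lengths.')
--     ka = [(0,) if x is None else (1, x) for x in a]
--     kb = [(0,) if x is None else (1, x) for x in b]
--     return (ka > kb) - (ka < kb)
-- ===== Notes on version B (the rewrite author's own statement) =====
-- stated objective: idiomatic
-- what changed: Replaces the per-element nullable_cmp recursion with two sentinel-key lists ((0,) for None, (1,x) otherwise) compared once by Python's built-in lexicographic list ordering, returning (ka>kb)-(ka<kb).
import Mathlib
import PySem

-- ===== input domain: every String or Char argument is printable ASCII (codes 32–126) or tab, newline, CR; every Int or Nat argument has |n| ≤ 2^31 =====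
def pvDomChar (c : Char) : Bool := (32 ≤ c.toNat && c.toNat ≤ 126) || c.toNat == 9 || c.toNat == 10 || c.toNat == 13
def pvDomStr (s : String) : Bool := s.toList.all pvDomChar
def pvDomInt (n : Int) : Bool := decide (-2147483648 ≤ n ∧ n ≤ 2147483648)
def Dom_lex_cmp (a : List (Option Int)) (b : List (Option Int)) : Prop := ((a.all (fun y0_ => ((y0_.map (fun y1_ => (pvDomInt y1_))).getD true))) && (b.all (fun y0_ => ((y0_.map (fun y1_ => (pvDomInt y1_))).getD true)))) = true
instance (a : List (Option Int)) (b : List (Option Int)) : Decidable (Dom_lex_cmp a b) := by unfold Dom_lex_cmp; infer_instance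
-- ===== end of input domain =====

-- B replaces A's nullable_cmp recursion by one built-in lexicographic comparison of
-- null-first key lists; equivalence is proved on equal-length inputs (Pre_).

-- ===== PORT A =====
def nullable_cmp (a : Option Int) (b : Option Int) : Int :=
  match a with
  | none => match b with
    | none => 0
    | some _ => -1
  | some x => match b with
    | none => 1
    | some y => if x = y then 0 else if x < y then -1 else 1

def lex_cmp (a : List (Option Int)) (b : List (Option Int)) : Int :=
  if a.length ≠ b.length then 0  -- Python raises ValueError here; excluded by Pre_
  else match a, b with
    | [], _ => 0
    | x :: xs, y :: ys =>
        let hcmp := nullable_cmp x y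
        if xs.length = 0 ∨ hcmp ≠ 0 then hcmp
        else lex_cmp xs ys
    | _ :: _, [] => 0  -- unreachable: lengths are equal

-- ===== PORT B =====
-- key (0,) for None and (1,x) for x is encoded as Option Int itself: none sorts first,
-- some x before some y iff x < y, equality is Option equality — exactly Python's
-- tuple ordering on the sentinel keys.
def keyLt (x : Option Int) (y : Option Int) : Bool :=
  match x, y with
  | none, none => false
  | none, some _ => true
  | some _, none => false
  | some u, some v => u < v

-- Python's list `<` on the key lists (lengths are equal under Pre_)
def keyListLt : List (Option Int) → List (Option Int) → Bool
  | [], [] => false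
  | [], _ :: _ => true
  | _ :: _, [] => false
  | x :: xs, y :: ys => if x = y then keyListLt xs ys else keyLt x y

def lex_cmp_alt (a : List (Option Int)) (b : List (Option Int)) : Int :=
  if a.length ≠ b.length then 0  -- B raises ValueError here; excluded by Pre_
  else (if keyListLt b a then 1 else 0) - (if keyListLt a b then 1 else 0)

-- ===== PRECONDITION & SPEC =====
-- Pre_ excludes exactly the inputs of unequal length, on which both A and B raise ValueError.
def Pre_lex_cmp (a : List (Option Int)) (b : List (Option Int)) : Prop := a.length = b.length
instance (a : List (Option Int)) (b : List (Option Int)) : Decidable (Pre_lex_cmp a b) := by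
  unfold Pre_lex_cmp; infer_instance

def pvWitness_lex_cmp : List (Option Int) × List (Option Int) := ([some 1, none], [some 1, some 3])

def Spec_lex_cmp (a : List (Option Int)) (b : List (Option Int)) (out : Int) : Prop := out = lex_cmp_alt a b
instance (a : List (Option Int)) (b : List (Option Int)) (out : Int) : Decidable (Spec_lex_cmp a b out) := by unfold Spec_lex_cmp; infer_instance

-- ===== CLAIM (what is proved, stated in full; the proofs are below) =====
def Claim_equal_lex_cmp : Prop := ∀ (a : List (Option Int)) (b : List (Option Int)), Dom_lex_cmp a b → Pre_lex_cmp a b → Spec_lex_cmp a b (lex_cmp a b)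

-- ===== LEMMAS AND PROOFS =====
theorem nullable_cmp_eq_self (x : Option Int) : nullable_cmp x x = 0 := by
  cases x <;> simp [nullable_cmp]

theorem head_case (x y : Option Int) (h : x ≠ y) :
    nullable_cmp x y = (if keyLt y x then (1 : Int) else 0) - (if keyLt x y then 1 else 0) := by
  cases x <;> cases y <;> simp_all [nullable_cmp, keyLt] <;> rename_i u v <;>
    rcases lt_trichotomy u v with hlt | heq | hgt <;> simp_all <;> omega

theorem lex_cmp_cons (x y : Option Int) (xs ys : List (Option Int)) (h : xs.length = ys.length) :
    lex_cmp (x::xs) (y::ys)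
      = if xs.length = 0 ∨ nullable_cmp x y ≠ 0 then nullable_cmp x y else lex_cmp xs ys := by
  rw [lex_cmp]
  simp [h]

theorem lex_cmp_alt_cons (x y : Option Int) (xs ys : List (Option Int)) (h : xs.length = ys.length) :
    lex_cmp_alt (x::xs) (y::ys)
      = (if keyListLt (y::ys) (x::xs) then (1 : Int) else 0)
        - (if keyListLt (x::xs) (y::ys) then 1 else 0) := by
  rw [lex_cmp_alt]
  simp [h]

theorem nullable_cmp_ne (x y : Option Int) (hxy : x ≠ y) : nullable_cmp x y ≠ 0 := by
  cases x <;> cases y <;> simp_all [nullable_cmp]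
  split_ifs <;> norm_num

theorem lex_cmp_eq (a b : List (Option Int)) (h : a.length = b.length) :
    lex_cmp a b = lex_cmp_alt a b := by
  induction a generalizing b with
  | nil =>
    cases b with
    | nil => simp [lex_cmp, lex_cmp_alt, keyListLt]
    | cons y ys => simp at h
  | cons x xs ih =>
    cases b with
    | nil => simp at h
    | cons y ys =>
      simp at h
      rw [lex_cmp_cons x y xs ys h, lex_cmp_alt_cons x y xs ys h]
      by_cases hxy : x = y
      · subst hxy
        rw [nullable_cmp_eq_self x]
        rw [show keyListLt (x::ys) (x::xs) = keyListLt ys xs from by simp [keyListLt],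
            show keyListLt (x::xs) (x::ys) = keyListLt xs ys from by simp [keyListLt]]
        by_cases hx0 : xs.length = 0
        · have hxs : xs = [] := List.length_eq_zero_iff.mp hx0
          have hys : ys = [] := List.length_eq_zero_iff.mp (by omega)
          subst hxs; subst hys
          simp [keyListLt]
        · rw [if_neg (by simp [hx0])]
          rw [ih ys h, lex_cmp_alt]
          simp [h]
      · rw [if_pos (Or.inr (nullable_cmp_ne x y hxy))]
        rw [show keyListLt (y::ys) (x::xs) = keyLt y x from by simp [keyListLt, Ne.symm hxy],
            show keyListLt (x::xs) (y::ys) = keyLt x y from by simp [keyListLt, hxy]]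
        exact head_case x y hxy

-- ===== VERDICT (by name: the statement is the Claim_ definition above) =====
theorem lex_cmp_spec : Claim_equal_lex_cmp := by
  intro a b _ hpre
  exact lex_cmp_eq a b hpre
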